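-- pv_equiv track=rewrite | github.com/kkriiis/phystech.map | DONE/Part_from_Kris.py | arg_min
-- ===== SOURCE A (Python) =====
-- import math
--
-- def arg_min(Weight, Viewed):
--     amin = -1
--     amax = math.inf     #максимальное значение
--     for i, t in enumerate(Weight):
--         if(t < amax) and i not in Viewed:
--             amax = t
--             amin = i
--     return amin
-- ===== SOURCE B (Python) =====
-- def arg_min(Weight, Viewed):
--     # Sort the (index, weight) pairs by weight (stable: ties keep index order),
--     # then return the first index that is not in Viewed; -1 if none exists.
--     for i, _ in sorted(enumerate(Weight), key=lambda p: p[1]):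
--         if i not in Viewed:
--             return i
--     return -1
-- ===== Notes on version B (the rewrite author's own statement) =====
-- stated objective: alternative
-- what changed: Replaces A's single-pass running-minimum loop (amin/amax state with an inf sentinel) by a sort-then-scan algorithm: stably sort the (index, weight) pairs by weight and return the first index not in Viewed, -1 if the scan exhausts.
import Mathlib
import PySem

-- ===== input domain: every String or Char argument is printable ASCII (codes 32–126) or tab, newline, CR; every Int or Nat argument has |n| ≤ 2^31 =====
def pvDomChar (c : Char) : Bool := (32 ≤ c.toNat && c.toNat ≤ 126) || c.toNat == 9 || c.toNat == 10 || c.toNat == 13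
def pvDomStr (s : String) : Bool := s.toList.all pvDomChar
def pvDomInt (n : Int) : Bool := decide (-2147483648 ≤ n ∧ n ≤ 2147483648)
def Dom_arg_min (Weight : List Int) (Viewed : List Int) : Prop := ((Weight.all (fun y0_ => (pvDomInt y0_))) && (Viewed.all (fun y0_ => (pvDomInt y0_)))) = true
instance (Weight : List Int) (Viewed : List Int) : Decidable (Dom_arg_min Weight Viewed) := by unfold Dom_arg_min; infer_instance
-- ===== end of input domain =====

-- B replaces A's running-minimum loop (amin/amax state, inf sentinel) by a sort-then-scan
-- algorithm: stably sort (index, weight) pairs by weight, return the first unviewed index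
-- (-1 if none); an alternative algorithm of similar cost, proved to return the same value.


-- ===== PORT A =====
-- A's loop body: state (amin, amax); amax : Option Int with none = math.inf
-- (Weight holds Ints, so 't < inf' is 't < amax' with none always greater).
def argMinStep (Viewed : List Int) (st : Int × Option Int) (p : Int × Int) : Int × Option Int :=
  if (match st.2 with | none => true | some m => decide (p.2 < m)) && !(Viewed.contains p.1)
  then (p.1, some p.2) else st

def arg_min (Weight : List Int) (Viewed : List Int) : Int :=
  ((PySem.List.enumerate Weight).foldl (argMinStep Viewed) (-1, none)).1

-- ===== PORT B =====
-- Source B: for i, _ in sorted(enumerate(Weight), key=lambda p: p[1]): if i not in Viewed: return i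
-- the for-loop with early return is List.find? over the sorted pair list
def arg_min_alt (Weight : List Int) (Viewed : List Int) : Int :=
  match (PySem.List.sorted (PySem.List.enumerate Weight) (fun p => p.2) false).find?
      (fun p => !(Viewed.contains p.1)) with
  | none => -1
  | some p => p.1

-- ===== PRECONDITION & SPEC =====
def Spec_arg_min (Weight : List Int) (Viewed : List Int) (out : Int) : Prop := out = arg_min_alt Weight Viewed
instance (Weight : List Int) (Viewed : List Int) (out : Int) : Decidable (Spec_arg_min Weight Viewed out) := by unfold Spec_arg_min; infer_instance

-- ===== CLAIM (what is proved, stated in full; the proofs are below) =====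
def Claim_equal_arg_min : Prop := ∀ (Weight : List Int) (Viewed : List Int), Dom_arg_min Weight Viewed → Spec_arg_min Weight Viewed (arg_min Weight Viewed)

-- ===== LEMMAS AND PROOFS =====

-- the unguarded running-strict-minimum step (first occurrence wins ties)
def minStep (acc : Option (Int × Int)) (p : Int × Int) : Option (Int × Int) :=
  match acc with
  | none => some p
  | some m => if p.2 < m.2 then some p else acc

-- A's guarded fold over a pair list is the unguarded running minimum over the filtered list
theorem foldA_eq_fold_filter (V : List Int) (l : List (Int × Int)) (acc : Option (Int × Int)) :
    l.foldl (argMinStep V) (match acc with | none => (-1, none) | some m => (m.1, some m.2))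
      = (match (l.filter (fun p => !(V.contains p.1))).foldl minStep acc with
         | none => ((-1 : Int), (none : Option Int)) | some m => (m.1, some m.2)) := by
  induction l generalizing acc with
  | nil => rfl
  | cons p t ih =>
      simp only [List.foldl_cons, List.filter_cons]
      by_cases hv : (p.1 ∈ V)
      · have h1 : argMinStep V (match acc with | none => (-1, none) | some m => (m.1, some m.2)) p
            = (match acc with | none => (-1, none) | some m => (m.1, some m.2)) := by
          cases acc <;> simp [argMinStep, hv]
        rw [h1, if_neg (by simp [hv])]
        exact ih acc
      · rw [if_pos (by simp [hv])]
        cases acc with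
        | none =>
            have h1 : argMinStep V ((-1 : Int), (none : Option Int)) p = (p.1, some p.2) := by
              simp [argMinStep, hv]
            simp only [List.foldl_cons]
            rw [h1]
            exact ih (some p)
        | some m =>
            simp only [List.foldl_cons, minStep]
            by_cases hlt : p.2 < m.2
            · have h1 : argMinStep V (m.1, some m.2) p = (p.1, some p.2) := by
                simp [argMinStep, hv, hlt]
              rw [h1, if_pos hlt]
              exact ih (some p)
            · have h1 : argMinStep V (m.1, some m.2) p = (m.1, some m.2) := by
                simp [argMinStep, hv, hlt]
              rw [h1, if_neg hlt]
              exact ih (some m)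

-- filtering commutes with insertion into a key-sorted list (kept element)
theorem filter_insertBy_pos {α : Type} (key : α → Int) (pred : α → Bool) (x : α) (l : List α)
    (hx : pred x = true) (hl : l.Pairwise (fun a c => key a ≤ key c)) :
    (PySem.List.insertBy (fun a b => decide (key a < key b)) x l).filter pred
      = PySem.List.insertBy (fun a b => decide (key a < key b)) x (l.filter pred) := by
  induction l with
  | nil => simp [PySem.List.insertBy, hx]
  | cons y t ih =>
      have hpair := (List.pairwise_cons.mp hl)
      by_cases hb : key x < key y
      · -- x goes first; every kept element of y :: t has key ≥ key y ≥ key x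
        have h1 : PySem.List.insertBy (fun a b => decide (key a < key b)) x (y :: t)
            = x :: y :: t := by simp [PySem.List.insertBy, hb]
        rw [h1]
        have h2 : ∀ zs : List α, (∀ z ∈ zs, key x < key z) →
            PySem.List.insertBy (fun a b => decide (key a < key b)) x zs = x :: zs := by
          intro zs hz
          cases zs with
          | nil => rfl
          | cons z zt => simp [PySem.List.insertBy, hz z (List.mem_cons_self)]
        rw [List.filter_cons, h2 ((y :: t).filter pred) ?_]
        · simp [hx]
        · intro z hz
          have hzmem := List.mem_of_mem_filter hz
          rcases List.mem_cons.mp hzmem with h | h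
          · subst h; exact hb
          · exact lt_of_lt_of_le hb (hpair.1 z h)
      · have h1 : PySem.List.insertBy (fun a b => decide (key a < key b)) x (y :: t)
            = y :: PySem.List.insertBy (fun a b => decide (key a < key b)) x t := by
          simp [PySem.List.insertBy, hb]
        rw [h1, List.filter_cons, List.filter_cons]
        by_cases hy : pred y = true
        · simp only [hy, if_true]
          rw [ih hpair.2]
          simp [PySem.List.insertBy, hb]
        · simp only [hy, Bool.false_eq_true, if_false]
          exact ih hpair.2

-- filtering commutes with insertion into a list (dropped element)
theorem filter_insertBy_neg {α : Type} (b : α → α → Bool) (pred : α → Bool) (x : α) (l : List α)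
    (hx : pred x = false) :
    (PySem.List.insertBy b x l).filter pred = l.filter pred := by
  induction l with
  | nil => simp [PySem.List.insertBy, hx]
  | cons y t ih =>
      simp only [PySem.List.insertBy]
      by_cases hb : b x y = true
      · simp [hb, List.filter_cons, hx]
      · simp [hb, List.filter_cons, ih]

-- a stable sort commutes with filtering
theorem filter_sorted {α : Type} (key : α → Int) (pred : α → Bool) (xs : List α) :
    (PySem.List.sorted xs key false).filter pred
      = PySem.List.sorted (xs.filter pred) key false := by
  have hs : ∀ (l : List α) (z : α), PySem.List.sorted (l ++ [z]) key false
      = PySem.List.insertBy (fun a b => decide (key a < key b)) z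
          (PySem.List.sorted l key false) := by
    intro l z
    rw [PySem.List.sorted_eq_foldl_insertBy, PySem.List.sorted_eq_foldl_insertBy,
      List.foldl_append, List.foldl_cons, List.foldl_nil]
  induction xs using List.reverseRecOn with
  | nil => rfl
  | append_singleton t x ih =>
      rw [hs]
      by_cases hx : pred x = true
      · rw [filter_insertBy_pos key pred x _ hx (PySem.List.sorted_pairwise t key), ih,
          List.filter_append]
        simp only [List.filter_cons, hx, if_true, List.filter_nil]
        rw [hs]
      · rw [filter_insertBy_neg _ pred x _ (by simpa using hx), ih, List.filter_append]
        simp [hx]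

-- the head of a stable key-sort is the fold of the running strict minimum
theorem head_sorted_eq_fold (key : (Int × Int) → Int) (xs : List (Int × Int)) :
    (PySem.List.sorted xs key false).head? = xs.foldl
      (fun acc p => match acc with
        | none => some p
        | some m => if key p < key m then some p else acc) none := by
  induction xs using List.reverseRecOn with
  | nil => rfl
  | append_singleton t x ih =>
      rw [PySem.List.sorted_eq_foldl_insertBy, List.foldl_append, List.foldl_cons, List.foldl_nil,
        ← PySem.List.sorted_eq_foldl_insertBy, List.foldl_append, List.foldl_cons, List.foldl_nil,
        ← ih]
      cases h : PySem.List.sorted t key false with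
      | nil => simp [PySem.List.insertBy]
      | cons y ys =>
          by_cases hb : key x < key y
          · simp [PySem.List.insertBy, hb]
          · simp [PySem.List.insertBy, hb]

-- find? is the head of the filtered list
theorem find?_eq_head_filter {α : Type} (pred : α → Bool) (l : List α) :
    l.find? pred = (l.filter pred).head? := by
  induction l with
  | nil => rfl
  | cons x t ih =>
      by_cases hx : pred x = true
      · simp [hx]
      · simp only [List.find?_cons, List.filter_cons, hx]
        simp only [Bool.false_eq_true, if_false]
        exact ih

-- ===== VERDICT (by name: the statement is the Claim_ definition above) =====
theorem arg_min_spec : Claim_equal_arg_min := by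
  intro Weight Viewed _
  show arg_min Weight Viewed = arg_min_alt Weight Viewed
  unfold arg_min arg_min_alt
  rw [find?_eq_head_filter, filter_sorted, head_sorted_eq_fold]
  have h := foldA_eq_fold_filter Viewed (PySem.List.enumerate Weight) none
  simp only at h
  rw [h]
  have hfun : List.foldl (fun acc p => match acc with
        | none => some p
        | some m => if (fun p : Int × Int => p.2) p < (fun p : Int × Int => p.2) m then some p
                    else acc)
      (none : Option (Int × Int))
      (List.filter (fun p => !(Viewed.contains p.1)) (PySem.List.enumerate Weight))
    = List.foldl minStep none
        (List.filter (fun p => !(Viewed.contains p.1)) (PySem.List.enumerate Weight)) := rfl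
  rw [hfun]
  rcases hf : List.foldl minStep none
      (List.filter (fun p => !(Viewed.contains p.1)) (PySem.List.enumerate Weight)) with _ | m <;>
    simp
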